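-- pv_equiv track=rewrite | github.com/sword-ace/GNN_4_regression | vis_gnn.py | predefine_core
-- ===== SOURCE A (Python) =====
-- def predefine_core(core_words):
--   core = []
--
--   cores = ['i', 'my', 'me', 'myself', 'mine','depressed', 'sleep','interest','move']
--   max_ind = len(core_words)-1
--
--   for c in cores:
--     indd = 0
--     while indd <= max_ind:
--         word = core_words[indd]
--         indd +=1
--         if word == c:
--           core.append(c)
--
--   return core
-- ===== SOURCE B (Python) =====
-- def predefine_core(core_words):
--   cores = ['i', 'my', 'me', 'myself', 'mine','depressed', 'sleep','interest','move']
--   counts = {}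
--   for w in core_words:
--     counts[w] = counts.get(w, 0) + 1
--   core = []
--   for c in cores:
--     core += [c] * counts.get(c, 0)
--   return core
-- ===== Notes on version B (the rewrite author's own statement) =====
-- stated objective: faster
-- what changed: Replaces the per-keyword full rescan of core_words (9 passes) with a single counting pass into a dict followed by an order-driven emit of [c]*count per keyword.
import Mathlib
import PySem

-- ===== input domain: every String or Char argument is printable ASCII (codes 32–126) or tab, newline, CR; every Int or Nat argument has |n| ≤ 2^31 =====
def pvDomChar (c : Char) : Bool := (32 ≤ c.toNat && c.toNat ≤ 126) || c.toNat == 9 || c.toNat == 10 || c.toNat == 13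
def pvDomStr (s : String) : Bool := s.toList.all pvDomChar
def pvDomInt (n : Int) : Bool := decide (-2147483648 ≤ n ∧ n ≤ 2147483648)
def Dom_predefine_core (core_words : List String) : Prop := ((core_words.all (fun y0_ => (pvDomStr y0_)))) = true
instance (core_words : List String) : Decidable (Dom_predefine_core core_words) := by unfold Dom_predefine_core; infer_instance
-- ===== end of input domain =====

-- B replaces A's per-keyword rescan of core_words with one counting pass plus an order-driven emit (faster by a constant factor).


-- ===== PORT A =====
-- inner while loop of A: 'while indd <= max_ind' with indd a Nat starting at 0 and
-- max_ind = len-1 is exactly 'indd < core_words.length'; core_words[indd] is then in range.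
def predefineInnerA (core_words : List String) (c : String) (indd : Nat) (core : List String) : List String :=
  if h : indd < core_words.length then
    let word := core_words[indd]
    predefineInnerA core_words c (indd + 1) (if word == c then core ++ [c] else core)
  else core
termination_by core_words.length - indd

def predefine_core (core_words : List String) : List String :=
  let cores : List String := ["i", "my", "me", "myself", "mine", "depressed", "sleep", "interest", "move"]
  cores.foldl (fun core c => predefineInnerA core_words c 0 core) []

-- ===== PORT B =====
def predefine_core_alt (core_words : List String) : List String :=
  let cores : List String := ["i", "my", "me", "myself", "mine", "depressed", "sleep", "interest", "move"]
  let counts : PySem.Dict String Int :=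
    core_words.foldl (fun d w => d.insert w (d.getD w 0 + 1)) PySem.Dict.empty
  cores.foldl (fun core c => core ++ PySem.List.pyRepeat [c] (counts.getD c 0)) []

-- ===== PRECONDITION & SPEC =====
def Spec_predefine_core (core_words : List String) (out : List String) : Prop := out = predefine_core_alt core_words
instance (core_words : List String) (out : List String) : Decidable (Spec_predefine_core core_words out) := by unfold Spec_predefine_core; infer_instance

-- ===== CLAIM (what is proved, stated in full; the proofs are below) =====
def Claim_equal_predefine_core : Prop := ∀ (core_words : List String), Dom_predefine_core core_words → Spec_predefine_core core_words (predefine_core core_words)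

-- ===== LEMMAS AND PROOFS =====
theorem predefineInnerA_eq (core_words : List String) (c : String) :
    ∀ (indd : Nat) (core : List String),
      predefineInnerA core_words c indd core
        = core ++ List.replicate ((core_words.drop indd).count c) c := by
  intro indd
  induction hn : core_words.length - indd using Nat.strong_induction_on generalizing indd with
  | _ n ih =>
    intro core
    rw [predefineInnerA]
    by_cases h : indd < core_words.length
    · simp only [h, dif_pos]
      have hdrop : core_words.drop indd = core_words[indd] :: core_words.drop (indd + 1) :=
        (List.drop_eq_getElem_cons h)
      rw [ih (core_words.length - (indd + 1)) (by omega) (indd + 1) rfl]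
      rw [hdrop]
      by_cases hw : core_words[indd] == c
      · have : core_words[indd] = c := by simpa using hw
        simp [this, List.replicate_succ]
      · rw [if_neg hw, List.count_cons, if_neg hw]
        simp
    · simp only [h, dif_neg, not_false_iff]
      have : core_words.drop indd = [] := List.drop_eq_nil_of_le (by omega)
      simp [this]

-- ===== VERDICT (by name: the statement is the Claim_ definition above) =====
theorem predefine_core_spec : Claim_equal_predefine_core := by
  unfold Claim_equal_predefine_core
  intro core_words _
  unfold Spec_predefine_core predefine_core predefine_core_alt
  apply PySem.List.foldl_congr_mem
  intro core c _
  rw [predefineInnerA_eq, PySem.Dict.getD_foldl_insert_add_one, PySem.List.pyRepeat_singleton]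
  simp
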